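-- pv_equiv track=rewrite | github.com/josefe-ing/fluxion-workspace | backend/services/calculo_abc_helper.py | obtener_abc_mas_critico
-- ===== SOURCE A (Python) =====
-- from typing import List, Optional
--
-- def obtener_abc_mas_critico(abc_tiendas: List[Optional[str]]) -> str:
--     """
--     Retorna el ABC más crítico de una lista.
--
--     Lógica: A > B > C > D (A es más crítico)
--
--     Args:
--         abc_tiendas: Lista de clasificaciones ABC ['A', 'B', 'C', 'D', None, 'SIN_VENTAS']
--
--     Returns:
--         str: ABC más crítico ('A', 'B', 'C', o 'D')
--
--     Examples:
--         >>> obtener_abc_mas_critico(['A', 'C'])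
--         'A'
--         >>> obtener_abc_mas_critico(['B', 'D', None])
--         'B'
--         >>> obtener_abc_mas_critico(['C', 'C'])
--         'C'
--         >>> obtener_abc_mas_critico([None, 'SIN_VENTAS'])
--         'D'
--     """
--     # Mapeo de ABC a prioridad (1 = más crítico)
--     prioridad = {
--         'A': 1,
--         'B': 2,
--         'C': 3,
--         'D': 4,
--         'SIN_VENTAS': 5,
--         None: 6
--     }
--
--     # Filtrar valores válidos
--     abc_validos = [abc for abc in abc_tiendas if abc in prioridad]
--
--     if not abc_validos:
--         return 'D'  # Default conservador
--
--     # Retornar el de MENOR prioridad (más crítico)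
--     return min(abc_validos, key=lambda x: prioridad[x])
-- ===== SOURCE B (Python) =====
-- _RANKING = ('A', 'B', 'C', 'D', 'SIN_VENTAS')
--
--
-- def obtener_abc_mas_critico(abc_tiendas):
--     present = set(abc_tiendas)
--     for abc in _RANKING:
--         if abc in present:
--             return abc
--     return 'D'
-- ===== Notes on version B (the rewrite author's own statement) =====
-- stated objective: simpler
-- what changed: Instead of filtering the list against the priority dict and taking min with a key function, B builds a set of the input once and scans the fixed 5-category ranking in priority order, returning the first present category (default 'D').
-- outside the precondition, e.g. on obtener_abc_mas_critico([None]): A returns None, B returns 'D'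
import Mathlib
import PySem

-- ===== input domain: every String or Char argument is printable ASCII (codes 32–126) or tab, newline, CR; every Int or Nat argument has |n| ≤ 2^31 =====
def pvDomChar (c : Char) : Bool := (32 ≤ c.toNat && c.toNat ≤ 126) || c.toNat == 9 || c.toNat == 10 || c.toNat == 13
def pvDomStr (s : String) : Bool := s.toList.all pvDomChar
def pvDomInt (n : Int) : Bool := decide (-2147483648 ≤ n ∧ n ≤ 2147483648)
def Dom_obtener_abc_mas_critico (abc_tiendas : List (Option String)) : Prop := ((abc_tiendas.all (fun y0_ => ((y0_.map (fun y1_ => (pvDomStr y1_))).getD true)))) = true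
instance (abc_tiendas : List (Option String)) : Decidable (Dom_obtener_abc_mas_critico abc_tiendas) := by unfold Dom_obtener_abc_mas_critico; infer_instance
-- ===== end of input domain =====

-- B replaces "filter against the priority dict, then min with a key" by "build set(abc_tiendas)
-- once, scan the fixed ranking ['A','B','C','D','SIN_VENTAS'] and return the first present"
-- (objective: simpler). Return-value equivalence only; neither version mutates its argument.

-- ===== PORT A =====
-- the literal dict `prioridad` of A
def pvPrioridad : PySem.Dict (Option String) Int :=
  PySem.Dict.ofList [(some "A", 1), (some "B", 2), (some "C", 3),
                     (some "D", 4), (some "SIN_VENTAS", 5), (none, 6)]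

def obtener_abc_mas_critico (abc_tiendas : List (Option String)) : String :=
  -- abc_validos = [abc for abc in abc_tiendas if abc in prioridad]
  let abc_validos := abc_tiendas.filter (fun abc => pvPrioridad.contains abc)
  if abc_validos = [] then "D"
  else
    -- min(abc_validos, key=lambda x: prioridad[x])
    match PySem.List.min? abc_validos (fun x => pvPrioridad.getD x 0) with
    | some (some s) => s
    | some none => ""    -- Python returns None here (not a str); excluded by Pre_
    | none => "D"        -- unreachable: abc_validos ≠ []

-- ===== PORT B =====
def pvRanking : List String := ["A", "B", "C", "D", "SIN_VENTAS"]

def obtener_abc_mas_critico_alt (abc_tiendas : List (Option String)) : String :=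
  let present : PySem.Set (Option String) := PySem.Set.ofList abc_tiendas
  match pvRanking.find? (fun abc => PySem.Set.contains present (some abc)) with
  | some abc => abc
  | none => "D"

-- ===== PRECONDITION & SPEC =====
-- Pre_ excludes lists that contain None but no valid ABC string: there A's min is None itself,
-- which is not a value of the declared return type str (B returns the default 'D' there).
def Pre_obtener_abc_mas_critico (abc_tiendas : List (Option String)) : Prop :=
  none ∈ abc_tiendas →
    (some "A" ∈ abc_tiendas ∨ some "B" ∈ abc_tiendas ∨ some "C" ∈ abc_tiendas ∨
     some "D" ∈ abc_tiendas ∨ some "SIN_VENTAS" ∈ abc_tiendas)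
instance (abc_tiendas : List (Option String)) : Decidable (Pre_obtener_abc_mas_critico abc_tiendas) := by unfold Pre_obtener_abc_mas_critico; infer_instance

def pvWitness_obtener_abc_mas_critico : List (Option String) :=
  [some "B", none, some "SIN_VENTAS", some "X"]

def Spec_obtener_abc_mas_critico (abc_tiendas : List (Option String)) (out : String) : Prop := out = obtener_abc_mas_critico_alt abc_tiendas
instance (abc_tiendas : List (Option String)) (out : String) : Decidable (Spec_obtener_abc_mas_critico abc_tiendas out) := by unfold Spec_obtener_abc_mas_critico; infer_instance

-- ===== CLAIM (what is proved, stated in full; the proofs are below) =====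
def Claim_equal_obtener_abc_mas_critico : Prop := ∀ (abc_tiendas : List (Option String)), Dom_obtener_abc_mas_critico abc_tiendas → Pre_obtener_abc_mas_critico abc_tiendas → Spec_obtener_abc_mas_critico abc_tiendas (obtener_abc_mas_critico abc_tiendas)

-- ===== LEMMAS AND PROOFS =====

-- membership in A's `prioridad` dict is exactly being one of the six listed values
theorem pv_valid_iff (x : Option String) :
    pvPrioridad.contains x = true ↔
      (x = some "A" ∨ x = some "B" ∨ x = some "C" ∨ x = some "D" ∨
       x = some "SIN_VENTAS" ∨ x = none) := by
  have hk : pvPrioridad.keys = [some "A", some "B", some "C", some "D", some "SIN_VENTAS", none] := by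
    decide
  rw [PySem.Dict.contains_iff_mem_keys, hk]
  simp [List.mem_cons]

-- the priority key is injective on valid values
theorem pv_key_inj (a b : Option String) (ha : pvPrioridad.contains a = true)
    (hb : pvPrioridad.contains b = true)
    (h : pvPrioridad.getD a 0 = pvPrioridad.getD b 0) : a = b := by
  rcases (pv_valid_iff a).mp ha with rfl | rfl | rfl | rfl | rfl | rfl <;>
    rcases (pv_valid_iff b).mp hb with rfl | rfl | rfl | rfl | rfl | rfl <;>
    first | rfl | (exfalso; revert h; decide)

-- the min of A's filtered list is the valid element of l below which no valid value occurs in l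
theorem pv_min_eq (l : List (Option String)) (c : Option String)
    (hc : pvPrioridad.contains c = true) (hcl : c ∈ l)
    (hnone : ∀ c', pvPrioridad.contains c' = true →
        pvPrioridad.getD c' 0 < pvPrioridad.getD c 0 → c' ∉ l) :
    PySem.List.min? (l.filter (fun x => pvPrioridad.contains x))
      (fun x => pvPrioridad.getD x 0) = some c := by
  have hcv : c ∈ l.filter (fun x => pvPrioridad.contains x) := List.mem_filter.mpr ⟨hcl, hc⟩
  cases hm : PySem.List.min? (l.filter (fun x => pvPrioridad.contains x))
      (fun x => pvPrioridad.getD x 0) with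
  | none =>
    rw [PySem.List.min?_eq_none_iff] at hm
    exact absurd hcv (by simp [hm])
  | some m =>
    have hmv := PySem.List.min?_mem hm
    have hle := PySem.List.min?_isMin hm c hcv
    have hmf := List.mem_filter.mp hmv
    rcases lt_or_eq_of_le hle with hlt | heq
    · exact absurd hmf.1 (hnone m hmf.2 hlt)
    · exact congrArg some (pv_key_inj m c hmf.2 hc heq)

-- ===== VERDICT (by name: the statement is the Claim_ definition above) =====
theorem obtener_abc_mas_critico_spec : Claim_equal_obtener_abc_mas_critico := by
  intro l _ hpre
  unfold Spec_obtener_abc_mas_critico obtener_abc_mas_critico obtener_abc_mas_critico_alt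
  by_cases hA : some "A" ∈ l
  · have hmin := pv_min_eq l (some "A") (by decide) hA
      (fun c' hc' hlt => by
        rcases (pv_valid_iff c').mp hc' with rfl | rfl | rfl | rfl | rfl | rfl <;>
          exact absurd hlt (by decide))
    have hne : l.filter (fun x => pvPrioridad.contains x) ≠ [] :=
      List.ne_nil_of_mem (List.mem_filter.mpr ⟨hA, by decide⟩)
    simp [hne, hmin, pvRanking, hA]
  · by_cases hB : some "B" ∈ l
    · have hmin := pv_min_eq l (some "B") (by decide) hB
        (fun c' hc' hlt => by
          rcases (pv_valid_iff c').mp hc' with rfl | rfl | rfl | rfl | rfl | rfl <;>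
            first | exact hA | (exact absurd hlt (by decide)))
      have hne : l.filter (fun x => pvPrioridad.contains x) ≠ [] :=
        List.ne_nil_of_mem (List.mem_filter.mpr ⟨hB, by decide⟩)
      simp [hne, hmin, pvRanking, List.find?, hA, hB]
    · by_cases hC : some "C" ∈ l
      · have hmin := pv_min_eq l (some "C") (by decide) hC
          (fun c' hc' hlt => by
            rcases (pv_valid_iff c').mp hc' with rfl | rfl | rfl | rfl | rfl | rfl <;>
              first | exact hA | exact hB | (exact absurd hlt (by decide)))
        have hne : l.filter (fun x => pvPrioridad.contains x) ≠ [] :=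
          List.ne_nil_of_mem (List.mem_filter.mpr ⟨hC, by decide⟩)
        simp [hne, hmin, pvRanking, List.find?, hA, hB, hC]
      · by_cases hD : some "D" ∈ l
        · have hmin := pv_min_eq l (some "D") (by decide) hD
            (fun c' hc' hlt => by
              rcases (pv_valid_iff c').mp hc' with rfl | rfl | rfl | rfl | rfl | rfl <;>
                first | exact hA | exact hB | exact hC | (exact absurd hlt (by decide)))
          have hne : l.filter (fun x => pvPrioridad.contains x) ≠ [] :=
            List.ne_nil_of_mem (List.mem_filter.mpr ⟨hD, by decide⟩)
          simp [hne, hmin, pvRanking, List.find?, hA, hB, hC, hD]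
        · by_cases hS : some "SIN_VENTAS" ∈ l
          · have hmin := pv_min_eq l (some "SIN_VENTAS") (by decide) hS
              (fun c' hc' hlt => by
                rcases (pv_valid_iff c').mp hc' with rfl | rfl | rfl | rfl | rfl | rfl <;>
                  first | exact hA | exact hB | exact hC | exact hD | (exact absurd hlt (by decide)))
            have hne : l.filter (fun x => pvPrioridad.contains x) ≠ [] :=
              List.ne_nil_of_mem (List.mem_filter.mpr ⟨hS, by decide⟩)
            simp [hne, hmin, pvRanking, List.find?, hA, hB, hC, hD, hS]
          · -- no ranked category present; Pre_ forces none ∉ l, so the filtered list is empty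
            have hN : none ∉ l := fun hn => by
              rcases hpre hn with h | h | h | h | h <;> first
                | exact hA h | exact hB h | exact hC h | exact hD h | exact hS h
            have hv : l.filter (fun x => pvPrioridad.contains x) = [] := by
              rw [List.filter_eq_nil_iff]
              intro x hx hcx
              rcases (pv_valid_iff x).mp hcx with rfl | rfl | rfl | rfl | rfl | rfl <;>
                first | exact hA hx | exact hB hx | exact hC hx | exact hD hx
                      | exact hS hx | exact hN hx
            simp [hv, pvRanking, List.find?, hA, hB, hC, hD, hS]
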